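-- pv_equiv track=rewrite | github.com/korverdev/advent_of_code | 2023/day_6.py | solutions
-- ===== SOURCE A (Python) =====
-- def solutions(time: int, distance_record: int) -> int:
--     """
--
--     >>> solutions(7, 9)
--     4
--     >>> solutions(15, 40)
--     8
--     >>> solutions(30, 200)
--     9
--     """
--     result = 0
--     for wait_time in range(1, time):
--         charge_time = time - wait_time
--
--         attempt = wait_time * charge_time
--         if attempt > distance_record:
--             result += 1
--
--     return result
-- ===== SOURCE B (Python) =====
-- def _isqrt(n):
--     # floor integer square root by binary search; invariant lo*lo <= n < hi*hi
--     lo, hi = 0, n + 1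
--     while hi - lo > 1:
--         mid = (lo + hi) // 2
--         if mid * mid <= n:
--             lo = mid
--         else:
--             hi = mid
--     return lo
--
--
-- def solutions(time: int, distance_record: int) -> int:
--     # w*(time-w) > d  <=>  (2w-time)^2 < time^2 - 4d; count integers in the root interval
--     D = time * time - 4 * distance_record
--     if D <= 0:
--         return 0
--     s = _isqrt(D - 1)          # largest s with s*s < D
--     half = (time + s) // 2
--     lo = max(1, time - half)   # ceil((time-s)/2), clamped to the loop range
--     hi = min(time - 1, half)   # floor((time+s)/2), clamped
--     return max(0, hi - lo + 1)
-- ===== Notes on version B (the rewrite author's own statement) =====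
-- stated objective: faster
-- what changed: Replaces the O(time) scan over all wait times by solving the quadratic inequality w*(time-w) > record: a binary-search integer square root of the discriminant gives the root interval and the count is its clamped length.
import Mathlib
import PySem

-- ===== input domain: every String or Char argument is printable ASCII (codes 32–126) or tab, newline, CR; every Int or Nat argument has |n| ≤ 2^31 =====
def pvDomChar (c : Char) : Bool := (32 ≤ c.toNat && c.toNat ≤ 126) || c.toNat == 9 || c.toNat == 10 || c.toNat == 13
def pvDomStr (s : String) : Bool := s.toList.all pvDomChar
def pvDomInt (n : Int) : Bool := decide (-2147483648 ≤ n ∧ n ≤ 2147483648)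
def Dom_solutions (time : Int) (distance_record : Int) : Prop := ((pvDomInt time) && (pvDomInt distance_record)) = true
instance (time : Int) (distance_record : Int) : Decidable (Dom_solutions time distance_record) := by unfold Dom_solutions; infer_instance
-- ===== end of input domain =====

-- B replaces A's linear scan over wait times by solving the quadratic inequality:
-- a binary-search integer square root of the discriminant gives the root interval,
-- and the result is the clamped length of that interval (objective: faster).

-- ===== PORT A =====
def solutions (time : Int) (distance_record : Int) : Int :=
  (PySem.List.pyRange 1 time 1).foldl
    (fun result wait_time =>
      let charge_time := time - wait_time
      let attempt := wait_time * charge_time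
      if attempt > distance_record then result + 1 else result) 0

-- ===== PORT B =====
-- termination fact for the binary-search midpoint, cited by isqrtLoop's decreasing_by
theorem pvMidBounds (lo hi : Int) (h : hi - lo > 1) :
    lo < PySem.Int.floordiv (lo + hi) 2 ∧ PySem.Int.floordiv (lo + hi) 2 < hi := by
  constructor
  · have := (PySem.Int.le_floordiv_iff_mul_le (a := lo + hi) (b := 2) (q := lo + 1) (by norm_num)).mpr (by omega)
    omega
  · have := (PySem.Int.floordiv_lt_iff_lt_mul (a := lo + hi) (b := 2) (q := hi) (by norm_num)).mpr (by omega)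
    omega

-- the 'while hi - lo > 1' loop of Source B's _isqrt
def isqrtLoop (n lo hi : Int) : Int :=
  if _h : hi - lo > 1 then
    let mid := PySem.Int.floordiv (lo + hi) 2
    if mid * mid ≤ n then isqrtLoop n mid hi else isqrtLoop n lo mid
  else lo
termination_by (hi - lo).toNat
decreasing_by
  · have := pvMidBounds lo hi _h; omega
  · have := pvMidBounds lo hi _h; omega

def isqrt (n : Int) : Int := isqrtLoop n 0 (n + 1)

def solutions_alt (time : Int) (distance_record : Int) : Int :=
  let D := time * time - 4 * distance_record
  if D ≤ 0 then 0
  else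
    let s := isqrt (D - 1)
    let half := PySem.Int.floordiv (time + s) 2
    let lo := max 1 (time - half)
    let hi := min (time - 1) half
    max 0 (hi - lo + 1)

-- ===== PRECONDITION & SPEC =====
def Spec_solutions (time : Int) (distance_record : Int) (out : Int) : Prop := out = solutions_alt time distance_record
instance (time : Int) (distance_record : Int) (out : Int) : Decidable (Spec_solutions time distance_record out) := by unfold Spec_solutions; infer_instance

-- ===== CLAIM (what is proved, stated in full; the proofs are below) =====
def Claim_equal_solutions : Prop := ∀ (time : Int) (distance_record : Int), Dom_solutions time distance_record → Spec_solutions time distance_record (solutions time distance_record)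

-- ===== LEMMAS AND PROOFS =====

-- the binary search maintains lo*lo ≤ n < hi*hi and returns the floor square root
theorem isqrtLoop_spec (n lo hi : Int) (h0 : 0 ≤ lo) (hlo : lo * lo ≤ n)
    (hhi : n < hi * hi) (hlt : lo < hi) :
    0 ≤ isqrtLoop n lo hi ∧ isqrtLoop n lo hi * isqrtLoop n lo hi ≤ n ∧
      n < (isqrtLoop n lo hi + 1) * (isqrtLoop n lo hi + 1) := by
  fun_induction isqrtLoop n lo hi with
  | case1 lo hi h mid hm ih =>
      have hb := pvMidBounds lo hi h
      exact ih (by omega) hm hhi hb.2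
  | case2 lo hi h mid hm ih =>
      have hb := pvMidBounds lo hi h
      exact ih h0 hlo (by omega) hb.1
  | case3 lo hi h =>
      have hhi' : hi = lo + 1 := by omega
      refine ⟨h0, hlo, ?_⟩
      rw [← hhi']; exact hhi

theorem isqrt_spec (n : Int) (hn : 0 ≤ n) :
    0 ≤ isqrt n ∧ isqrt n * isqrt n ≤ n ∧ n < (isqrt n + 1) * (isqrt n + 1) := by
  have := isqrtLoop_spec n 0 (n + 1) le_rfl (by simpa using hn) (by nlinarith) (by omega)
  simpa [isqrt] using this

-- A's loop is a countP over the range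
theorem solutions_countP (t d : Int) :
    solutions t d = ((PySem.List.pyRange 1 t 1).countP (fun w => decide (w * (t - w) > d)) : Int) := by
  show (PySem.List.pyRange 1 t 1).foldl (fun result w => if w * (t - w) > d then result + 1 else result) 0 = _
  rw [PySem.List.foldl_ite_add_one]
  simp

-- the quadratic test 'w*(t-w) > d' is the interval test 't - half ≤ w ≤ half'
theorem p_iff (t d s w : Int) (hs0 : 0 ≤ s) (hs1 : s * s ≤ t * t - 4 * d - 1)
    (hs2 : t * t - 4 * d - 1 < (s + 1) * (s + 1)) :
    (w * (t - w) > d) ↔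
      (t - PySem.Int.floordiv (t + s) 2 ≤ w ∧ w ≤ PySem.Int.floordiv (t + s) 2) := by
  have hub : ∀ q : Int, q ≤ PySem.Int.floordiv (t + s) 2 ↔ q * 2 ≤ t + s := by
    intro q; exact PySem.Int.le_floordiv_iff_mul_le (by norm_num)
  constructor
  · intro hp
    have hx : (2 * w - t) * (2 * w - t) < (s + 1) * (s + 1) := by nlinarith [sq_nonneg (2 * w - t)]
    have h1 : 2 * w - t ≤ s := by
      by_cases hc : 2 * w - t ≤ s
      · exact hc
      · have hge : s + 1 ≤ 2 * w - t := by omega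
        nlinarith [sq_nonneg (2 * w - t)]
    have h2 : -s ≤ 2 * w - t := by
      by_cases hc : -s ≤ 2 * w - t
      · exact hc
      · have hge : s + 1 ≤ -(2 * w - t) := by omega
        nlinarith [sq_nonneg (2 * w - t)]
    constructor
    · have := (hub (t - w)).mpr (by omega)
      omega
    · exact (hub w).mpr (by omega)
  · rintro ⟨h1, h2⟩
    have hw2 : w * 2 ≤ t + s := (hub w).mp h2
    have htw : (t - w) * 2 ≤ t + s := (hub (t - w)).mp (by omega)
    have ha : 2 * w - t ≤ s := by omega
    have hb : -s ≤ 2 * w - t := by omega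
    have hsq : (2 * w - t) * (2 * w - t) ≤ s * s := by nlinarith [sq_nonneg (2 * w - t)]
    nlinarith [sq_nonneg (2 * w - t)]

-- counting the integers of [L, H] inside range(1, t)
theorem count_interval (t L H : Int) (hL : 1 ≤ L) (hH : H ≤ t - 1) :
    (((PySem.List.pyRange 1 t 1).countP (fun w => decide (L ≤ w ∧ w ≤ H))) : Int)
      = max 0 (H - L + 1) := by
  by_cases hc : L ≤ H
  · have hsplit1 : PySem.List.pyRange 1 t 1
        = PySem.List.pyRange 1 L 1 ++ PySem.List.pyRange L t 1 :=
      PySem.List.pyRange_one_append 1 L t hL (by omega)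
    have hsplit2 : PySem.List.pyRange L t 1
        = PySem.List.pyRange L (H + 1) 1 ++ PySem.List.pyRange (H + 1) t 1 :=
      PySem.List.pyRange_one_append L (H + 1) t (by omega) (by omega)
    rw [hsplit1, hsplit2, List.countP_append, List.countP_append]
    have z1 : (PySem.List.pyRange 1 L 1).countP (fun w => decide (L ≤ w ∧ w ≤ H)) = 0 := by
      rw [List.countP_eq_zero]
      intro a ha
      have := (PySem.List.mem_pyRange_one).mp ha
      simp only [decide_eq_true_eq]
      omega
    have z2 : (PySem.List.pyRange (H + 1) t 1).countP (fun w => decide (L ≤ w ∧ w ≤ H)) = 0 := by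
      rw [List.countP_eq_zero]
      intro a ha
      have := (PySem.List.mem_pyRange_one).mp ha
      simp only [decide_eq_true_eq]
      omega
    have full : (PySem.List.pyRange L (H + 1) 1).countP (fun w => decide (L ≤ w ∧ w ≤ H))
        = (PySem.List.pyRange L (H + 1) 1).length := by
      rw [List.countP_eq_length]
      intro a ha
      have := (PySem.List.mem_pyRange_one).mp ha
      simp only [decide_eq_true_eq]
      omega
    rw [z1, z2, full, PySem.List.length_pyRange_one]
    push_cast
    omega
  · rw [List.countP_eq_zero.mpr]
    · omega
    · intro a ha
      simp only [decide_eq_true_eq]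
      omega

theorem main_equiv (t d : Int) : solutions t d = solutions_alt t d := by
  rw [solutions_countP]
  by_cases hD : t * t - 4 * d ≤ 0
  · rw [solutions_alt]
    simp only [hD, if_pos]
    rw [List.countP_eq_zero.mpr]
    · rfl
    · intro w hw
      simp only [decide_eq_true_eq]
      intro hp
      nlinarith [sq_nonneg (2 * w - t)]
  · have hD' : 0 < t * t - 4 * d := by omega
    obtain ⟨hs0, hs1, hs2⟩ := isqrt_spec (t * t - 4 * d - 1) (by omega)
    set s := isqrt (t * t - 4 * d - 1) with hs
    set half := PySem.Int.floordiv (t + s) 2 with hhalf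
    have hcongr : (PySem.List.pyRange 1 t 1).countP (fun w => decide (w * (t - w) > d))
        = (PySem.List.pyRange 1 t 1).countP
            (fun w => decide (max 1 (t - half) ≤ w ∧ w ≤ min (t - 1) half)) := by
      apply List.countP_congr
      intro w hw
      have hmem := (PySem.List.mem_pyRange_one).mp hw
      simp only [decide_eq_true_eq]
      rw [p_iff t d s w hs0 (by omega) (by omega)]
      omega
    rw [hcongr, count_interval t _ _ (by omega) (by omega)]
    rw [solutions_alt]
    simp only [hD, if_false]
    rfl

-- ===== VERDICT (by name: the statement is the Claim_ definition above) =====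
theorem solutions_spec : Claim_equal_solutions := by
  intro time distance_record _
  unfold Spec_solutions
  exact main_equiv time distance_record
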